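-- pv_equiv track=rewrite | github.com/ahmadsultan03/Fyndra | Fyndra-Code/Fyndra updated v1.1.0.py | get_relevant_indices_for_query
-- ===== SOURCE A (Python) =====
-- def get_relevant_indices_for_query(query_tokens, processed_docs):
--     relevant_indices = []
--     if not query_tokens:  # Handle empty queries
--         return relevant_indices
--
--     query_set = set(query_tokens)
--
--     for idx, doc in enumerate(processed_docs):
--         doc_tokens = set(doc.split())
--         intersection = query_set & doc_tokens
--
--         # More lenient relevance criteria:
--         # 1. At least one term matches (minimum requirement)
--         # 2. Higher scores for better matches
--         if len(intersection) > 0: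
--             relevant_indices.append(idx)
--
--     return relevant_indices
-- ===== SOURCE B (Python) =====
-- def get_relevant_indices_for_query(query_tokens, processed_docs):
--     # Inverted index: token -> set of doc indices containing it.
--     index = {}
--     for idx, doc in enumerate(processed_docs):
--         for token in doc.split():
--             index.setdefault(token, set()).add(idx)
--     hits = set()
--     for t in set(query_tokens):
--         hits.update(index.get(t, set()))
--     return sorted(hits)
-- ===== Notes on version B (the rewrite author's own statement) =====
-- stated objective: alternative
-- what changed: B builds an inverted index (token -> set of doc indices) once, then returns the sorted union of the index entries for the query tokens, instead of A's per-document membership test against the query set.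
import Mathlib
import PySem

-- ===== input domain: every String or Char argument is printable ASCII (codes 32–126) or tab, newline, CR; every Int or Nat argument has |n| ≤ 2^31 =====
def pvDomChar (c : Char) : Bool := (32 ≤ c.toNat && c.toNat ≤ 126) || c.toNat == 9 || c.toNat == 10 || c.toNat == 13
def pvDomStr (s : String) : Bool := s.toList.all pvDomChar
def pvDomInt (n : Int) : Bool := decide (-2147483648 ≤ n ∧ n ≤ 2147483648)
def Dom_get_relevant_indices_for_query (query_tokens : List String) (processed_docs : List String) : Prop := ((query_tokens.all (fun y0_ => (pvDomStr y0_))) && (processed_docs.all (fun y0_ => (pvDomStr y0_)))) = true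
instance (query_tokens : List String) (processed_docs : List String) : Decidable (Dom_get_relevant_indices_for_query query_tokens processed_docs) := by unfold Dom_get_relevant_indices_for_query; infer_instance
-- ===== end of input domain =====

-- B replaces A's per-document intersection test with an inverted index (token -> set of
-- doc indices) queried per token and a final sort; objective: alternative decomposition.

-- ===== PORT A =====
def get_relevant_indices_for_query (query_tokens : List String) (processed_docs : List String) : List Int :=
  let relevant_indices : List Int := []
  if query_tokens = [] then relevant_indices
  else
    let query_set : PySem.Set String := PySem.Set.ofList query_tokens
    (PySem.List.enumerate processed_docs).foldl
      (fun acc p =>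
        let doc_tokens : PySem.Set String := PySem.Set.ofList (PySem.Str.split₀ p.2)
        let intersection := PySem.Set.inter query_set doc_tokens
        if PySem.Set.len intersection > 0 then acc ++ [p.1] else acc)
      relevant_indices

-- ===== PORT B =====
def get_relevant_indices_for_query_alt (query_tokens : List String) (processed_docs : List String) : List Int :=
  let index : PySem.Dict String (PySem.Set Int) :=
    (PySem.List.enumerate processed_docs).foldl
      (fun d p =>
        (PySem.Str.split₀ p.2).foldl
          (fun d token =>
            d.modify token PySem.Set.empty (fun s => PySem.Set.add s p.1))
          d)
      PySem.Dict.empty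
  let hits : PySem.Set Int :=
    (PySem.Set.ofList query_tokens).foldl
      (fun h t => PySem.Set.update h (index.getD t PySem.Set.empty)) PySem.Set.empty
  PySem.List.sorted hits (fun x => x) false

-- ===== PRECONDITION & SPEC =====
def Spec_get_relevant_indices_for_query (query_tokens : List String) (processed_docs : List String) (out : List Int) : Prop := out = get_relevant_indices_for_query_alt query_tokens processed_docs
instance (query_tokens : List String) (processed_docs : List String) (out : List Int) : Decidable (Spec_get_relevant_indices_for_query query_tokens processed_docs out) := by unfold Spec_get_relevant_indices_for_query; infer_instance

-- ===== CLAIM (what is proved, stated in full; the proofs are below) =====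
def Claim_equal_get_relevant_indices_for_query : Prop := ∀ (query_tokens : List String) (processed_docs : List String), Dom_get_relevant_indices_for_query query_tokens processed_docs → Spec_get_relevant_indices_for_query query_tokens processed_docs (get_relevant_indices_for_query query_tokens processed_docs)

-- ===== LEMMAS AND PROOFS =====

lemma pvFoldlAppendIf {α β : Type} (p : α → Prop) [DecidablePred p] (f : α → β)
    (l : List α) (acc : List β) :
    l.foldl (fun acc x => if p x then acc ++ [f x] else acc) acc =
      acc ++ (l.filter (fun x => decide (p x))).map f := by
  induction l generalizing acc with
  | nil => simp
  | cons y ys ih =>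
    simp only [List.foldl_cons, List.filter_cons]
    by_cases hy : p y
    · simp [hy, ih]
    · simp [hy, ih]

-- A's loop is append-if over enumerate: its result is the filtered index list.
lemma pvA_eq_filter (query_tokens processed_docs : List String) (h : query_tokens ≠ []) :
    get_relevant_indices_for_query query_tokens processed_docs =
      ((PySem.List.enumerate processed_docs).filter
        (fun p => PySem.Set.len (PySem.Set.inter (PySem.Set.ofList query_tokens)
                    (PySem.Set.ofList (PySem.Str.split₀ p.2))) > 0)).map (·.1) := by
  simp only [get_relevant_indices_for_query, if_neg h]
  rw [pvFoldlAppendIf]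
  simp

-- inner token loop: lookup after folding inserts
lemma pvTok_mem (toks : List String) (v : Int) (d : PySem.Dict String (PySem.Set Int))
    (t : String) (x : Int) :
    x ∈ (toks.foldl
      (fun d token =>
        d.modify token PySem.Set.empty (fun s => PySem.Set.add s v))
      d).getD t PySem.Set.empty ↔
    x ∈ d.getD t PySem.Set.empty ∨ (t ∈ toks ∧ x = v) := by
  induction toks generalizing d with
  | nil => simp
  | cons y ys ih =>
    simp only [List.foldl_cons, ih, PySem.Dict.getD_modify, List.mem_cons]
    by_cases hy : t = y
    · subst hy
      simp [PySem.Set.mem_add, PySem.Set.empty]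
      tauto
    · simp [hy]

-- membership in the inverted index built by B
lemma pvIndex_mem (docs : List String) (s : Int) (d : PySem.Dict String (PySem.Set Int))
    (t : String) (x : Int) :
    x ∈ ((PySem.List.enumerate docs s).foldl
      (fun d p =>
        (PySem.Str.split₀ p.2).foldl
          (fun d token =>
            d.modify token PySem.Set.empty (fun s => PySem.Set.add s p.1))
          d)
      d).getD t PySem.Set.empty ↔
    x ∈ d.getD t PySem.Set.empty ∨
      ∃ k : Nat, ∃ hk : k < docs.length, x = s + k ∧ t ∈ PySem.Str.split₀ docs[k] := by
  induction docs generalizing s d with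
  | nil => simp [PySem.List.enumerate_nil]
  | cons doc rest ih =>
    rw [PySem.List.enumerate_cons]
    simp only [List.foldl_cons]
    rw [ih, pvTok_mem]
    constructor
    · rintro ((hd | ⟨hm, rfl⟩) | ⟨k, hk, rfl, ht⟩)
      · exact Or.inl hd
      · exact Or.inr ⟨0, by simp, by simp, by simpa⟩
      · refine Or.inr ⟨k + 1, by simpa using Nat.succ_lt_succ hk, by push_cast; ring, by simpa⟩
    · rintro (hd | ⟨k, hk, rfl, ht⟩)
      · exact Or.inl (Or.inl hd)
      · cases k with
        | zero => exact Or.inl (Or.inr ⟨by simpa using ht, by simp⟩)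
        | succ k =>
          refine Or.inr ⟨k, by simp only [List.length_cons] at hk; omega, by push_cast; ring, by simpa using ht⟩

-- hits set: membership and nodup
lemma pvHits_mem (qs : List String) (f : String → PySem.Set Int) (h : PySem.Set Int) (x : Int) :
    x ∈ qs.foldl (fun h t => PySem.Set.update h (f t)) h ↔ x ∈ h ∨ ∃ t ∈ qs, x ∈ f t := by
  induction qs generalizing h with
  | nil => simp
  | cons y ys ih =>
    simp only [List.foldl_cons, ih, PySem.Set.mem_update, List.mem_cons]
    constructor
    · rintro ((hh | hy) | ⟨t, ht, hx⟩)
      · exact Or.inl hh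
      · exact Or.inr ⟨y, Or.inl rfl, hy⟩
      · exact Or.inr ⟨t, Or.inr ht, hx⟩
    · rintro (hh | ⟨t, rfl | ht, hx⟩)
      · exact Or.inl (Or.inl hh)
      · exact Or.inl (Or.inr hx)
      · exact Or.inr ⟨t, ht, hx⟩

lemma pvHits_nodup (qs : List String) (f : String → PySem.Set Int) (h : PySem.Set Int)
    (hn : h.Nodup) : (qs.foldl (fun h t => PySem.Set.update h (f t)) h).Nodup := by
  induction qs generalizing h with
  | nil => exact hn
  | cons y ys ih => exact ih _ (PySem.Set.nodup_update _ _ hn)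

-- A's relevance test is "some query token occurs in the doc"
lemma pvCond_iff (qs : List String) (doc : String) :
    (PySem.Set.len (PySem.Set.inter (PySem.Set.ofList qs)
        (PySem.Set.ofList (PySem.Str.split₀ doc))) > 0) ↔
      ∃ t ∈ qs, t ∈ PySem.Str.split₀ doc := by
  rw [show PySem.Set.len (PySem.Set.inter (PySem.Set.ofList qs)
        (PySem.Set.ofList (PySem.Str.split₀ doc))) =
      (PySem.Set.inter (PySem.Set.ofList qs) (PySem.Set.ofList (PySem.Str.split₀ doc))).length
      from rfl]
  rw [gt_iff_lt, Int.natCast_pos, List.length_pos_iff_exists_mem]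
  simp [PySem.Set.mem_inter, PySem.Set.mem_ofList]

-- ===== VERDICT (by name: the statement is the Claim_ definition above) =====
theorem get_relevant_indices_for_query_spec : Claim_equal_get_relevant_indices_for_query := by
  unfold Claim_equal_get_relevant_indices_for_query
  intro qt pd _
  unfold Spec_get_relevant_indices_for_query
  by_cases hq : qt = []
  · subst hq; rfl
  · rw [pvA_eq_filter qt pd hq]
    unfold get_relevant_indices_for_query_alt
    set cond := fun p : Int × String =>
      decide (PySem.Set.len (PySem.Set.inter (PySem.Set.ofList qt)
        (PySem.Set.ofList (PySem.Str.split₀ p.2))) > 0) with hcond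
    set L := ((PySem.List.enumerate pd).filter cond).map (·.1) with hL
    set idx := (PySem.List.enumerate pd).foldl
      (fun d p =>
        (PySem.Str.split₀ p.2).foldl
          (fun d token =>
            d.modify token PySem.Set.empty (fun s => PySem.Set.add s p.1))
          d)
      PySem.Dict.empty with hidx
    set hits := (PySem.Set.ofList qt).foldl (fun h t => PySem.Set.update h (idx.getD t PySem.Set.empty))
      PySem.Set.empty with hhits
    have hpwE : (PySem.List.enumerate pd (0:Int)).Pairwise (fun p q => p.1 < q.1) :=
      PySem.List.pairwise_lt_enumerate pd 0
    have hpwL : L.Pairwise (· < ·) := by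
      rw [hL]
      exact List.Pairwise.map _ (fun a b h => h) (hpwE.filter cond)
    have hLnd : L.Nodup := hpwL.imp (fun h => ne_of_lt h)
    have hHnd : hits.Nodup := pvHits_nodup _ _ _ (List.nodup_nil)
    have hmem : ∀ a, a ∈ L ↔ a ∈ hits := by
      intro a
      rw [hhits, pvHits_mem]
      constructor
      · intro ha
        rw [hL] at ha
        rcases List.mem_map.1 ha with ⟨p, hp, rfl⟩
        rcases List.mem_filter.1 hp with ⟨hpe, hpc⟩
        rcases (PySem.List.mem_enumerate_iff _ _ _).1 hpe with ⟨k, hk, rfl⟩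
        rw [hcond] at hpc
        rcases (pvCond_iff qt _).1 (by simpa using hpc) with ⟨t, htq, htd⟩
        refine Or.inr ⟨t, (PySem.Set.mem_ofList _ _).2 htq, ?_⟩
        rw [hidx, pvIndex_mem]
        exact Or.inr ⟨k, hk, by simp, htd⟩
      · rintro (ha | ⟨t, htq, ha⟩)
        · simp [PySem.Set.empty] at ha
        · rw [hidx, pvIndex_mem] at ha
          rcases ha with ha | ⟨k, hk, rfl, htd⟩
          · simp [PySem.Dict.getD_empty, PySem.Set.empty] at ha
          · rw [hL]
            refine List.mem_map.2 ⟨((0:Int) + k, pd[k]), List.mem_filter.2 ⟨?_, ?_⟩, rfl⟩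
            · exact (PySem.List.mem_enumerate_iff _ _ _).2 ⟨k, hk, rfl⟩
            · rw [hcond]
              simpa using (pvCond_iff qt _).2 ⟨t, (PySem.Set.mem_ofList _ _).1 htq, htd⟩
    have hperm : L.Perm hits := (List.perm_ext_iff_of_nodup hLnd hHnd).2 hmem
    exact (PySem.List.sorted_eq_of_perm_of_pairwise_lt _ _ _ hperm hpwL).symm
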